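-- pv_equiv track=rewrite | github.com/dima-mazur/my_python_udemy2022 | tasks/chapter_4_1.py | any_duplicates
-- ===== SOURCE A (Python) =====
-- def any_duplicates(square):
--     concat_list = []
--     for i in square:
--         for x in i:
--             concat_list.append(x)
--     for v in concat_list:
--         if concat_list.count(v) > 1:
--             return False
--     return True
-- ===== SOURCE B (Python) =====
-- def any_duplicates(square):
--     flat = sorted(x for row in square for x in row)
--     for a, b in zip(flat, flat[1:]):
--         if a == b:
--             return False
--     return True
-- ===== Notes on version B (the rewrite author's own statement) =====
-- stated objective: alternative
-- what changed: Replaces the per-element count() scan over the flattened list with sort-then-adjacent-compare on the flattened list; it trades the quadratic scan (which on duplicate-free inputs costs O(n^2)) for an O(n log n) sort, though A's early exit wins on duplicate-heavy inputs.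
import Mathlib
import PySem

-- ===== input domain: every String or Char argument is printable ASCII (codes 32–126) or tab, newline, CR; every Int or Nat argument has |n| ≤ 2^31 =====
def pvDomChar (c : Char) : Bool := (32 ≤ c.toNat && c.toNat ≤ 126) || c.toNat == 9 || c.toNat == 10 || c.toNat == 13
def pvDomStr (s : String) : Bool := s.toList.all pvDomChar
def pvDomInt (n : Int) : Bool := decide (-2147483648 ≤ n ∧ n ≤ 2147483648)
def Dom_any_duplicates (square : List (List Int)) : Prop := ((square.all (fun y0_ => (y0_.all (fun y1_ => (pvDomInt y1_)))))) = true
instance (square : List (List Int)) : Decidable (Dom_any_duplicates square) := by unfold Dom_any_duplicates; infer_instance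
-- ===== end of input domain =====

-- B replaces A's quadratic per-element count() scan with flatten, sort, and one adjacent-compare pass.

-- ===== PORT A =====
-- the 'for v in concat_list: if concat_list.count(v) > 1: return False' loop
def pvALoop (full : List Int) : List Int → Bool
  | [] => true
  | v :: vs => if full.count v > 1 then false else pvALoop full vs

def any_duplicates (square : List (List Int)) : Bool :=
  let concat_list := square.foldl (fun acc i => i.foldl (fun acc2 x => acc2 ++ [x]) acc) []
  pvALoop concat_list concat_list

-- ===== PORT B =====
-- the 'for a, b in zip(flat, flat[1:]): if a == b: return False' loop
def pvBLoop : List (Int × Int) → Bool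
  | [] => true
  | (a, b) :: rest => if a == b then false else pvBLoop rest

def any_duplicates_alt (square : List (List Int)) : Bool :=
  let flat := PySem.List.sorted (square.flatMap (fun row => row)) (fun x => x) false
  pvBLoop (flat.zip (PySem.List.slice flat (some 1) none))

-- ===== PRECONDITION & SPEC =====
def Spec_any_duplicates (square : List (List Int)) (out : Bool) : Prop := out = any_duplicates_alt square
instance (square : List (List Int)) (out : Bool) : Decidable (Spec_any_duplicates square out) := by unfold Spec_any_duplicates; infer_instance

-- ===== CLAIM (what is proved, stated in full; the proofs are below) =====
def Claim_equal_any_duplicates : Prop := ∀ (square : List (List Int)), Dom_any_duplicates square → Spec_any_duplicates square (any_duplicates square)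

-- ===== LEMMAS AND PROOFS =====

-- A's inner loop returns true iff no element of the remaining list is duplicated in the full list
theorem pvALoop_eq_true_iff (full l : List Int) :
    pvALoop full l = true ↔ ∀ v ∈ l, full.count v ≤ 1 := by
  induction l with
  | nil => simp [pvALoop]
  | cons v vs ih =>
    simp only [pvALoop, List.mem_cons]
    split_ifs with h
    · simp; exact fun hc => absurd hc (by omega)
    · simp only [ih]
      constructor
      · rintro hv w (rfl | hw)
        · omega
        · exact hv w hw
      · intro hv w hw; exact hv w (Or.inr hw)

theorem any_duplicates_eq_nodup (square : List (List Int)) :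
    any_duplicates square = decide (square.flatMap (fun row => row)).Nodup := by
  unfold any_duplicates
  have hflat : square.foldl (fun acc i => i.foldl (fun acc2 x => acc2 ++ [x]) acc) []
      = square.flatMap (fun row => row) := by
    simp only [PySem.List.foldl_append_singleton]
    exact PySem.List.foldl_append_eq_flatMap (fun row => row) square []
  rw [hflat]
  set L := square.flatMap (fun row => row)
  rcases Decidable.em L.Nodup with h | h
  · simp [h, pvALoop_eq_true_iff]
    exact fun v _ => (List.nodup_iff_count_le_one.mp h v)
  · simp only [h, decide_false]
    rw [← Bool.not_eq_true, pvALoop_eq_true_iff]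
    intro hv
    exact h (List.nodup_iff_count_le_one.mpr (fun v => by
      by_cases hm : v ∈ L
      · exact hv v hm
      · simp [List.count_eq_zero_of_not_mem hm]))

-- B's adjacent-compare loop over zip(s, s[1:]) checks that adjacent elements differ
theorem pvBLoop_zip_eq_true_iff (s : List Int) :
    pvBLoop (s.zip s.tail) = true ↔ s.IsChain (· ≠ ·) := by
  induction s with
  | nil => simp [pvBLoop]
  | cons a t ih =>
    cases t with
    | nil => simp [pvBLoop]
    | cons b t' =>
      simp only [List.tail_cons, List.zip_cons_cons, pvBLoop,
        List.isChain_cons_cons]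
      simp only [List.tail_cons] at ih
      split_ifs with h
      · simp_all
      · simp only [ih]
        simp only [beq_iff_eq] at h
        tauto

-- adjacent-distinct plus adjacent-nondecreasing gives adjacent-increasing
theorem isChain_lt_of_ne_le : ∀ {s : List Int},
    s.IsChain (· ≠ ·) → s.IsChain (· ≤ ·) → s.IsChain (· < ·)
  | [], _, _ => by simp
  | [_], _, _ => by simp
  | a :: b :: t, h1, h2 => by
    rw [List.isChain_cons_cons] at h1 h2 ⊢
    exact ⟨lt_of_le_of_ne h2.1 h1.1, isChain_lt_of_ne_le h1.2 h2.2⟩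

theorem any_duplicates_alt_eq_nodup (square : List (List Int)) :
    any_duplicates_alt square = decide (square.flatMap (fun row => row)).Nodup := by
  unfold any_duplicates_alt
  simp only []
  set L := square.flatMap (fun row => row) with hL
  set s := PySem.List.sorted L (fun x => x) false with hs
  have hslice : PySem.List.slice s (some 1) none = s.drop 1 :=
    PySem.List.slice_from s (by norm_num)
  have hperm : s.Perm L := PySem.List.sorted_perm L (fun x => x) false
  have hpw : s.Pairwise (· ≤ ·) := by
    simpa using PySem.List.sorted_pairwise L (fun x => x)
  have hnodup : L.Nodup ↔ s.Nodup := (hperm.nodup_iff).symm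
  rw [hslice, List.drop_one]
  rcases Decidable.em L.Nodup with h | h
  · have hsn : s.Nodup := hnodup.mp h
    have hlt : s.Pairwise (· < ·) :=
      (hpw.and hsn).imp (fun hab => lt_of_le_of_ne hab.1 hab.2)
    simp only [h, decide_true, pvBLoop_zip_eq_true_iff]
    exact (hlt.imp (fun hab => ne_of_lt hab)).isChain
  · simp only [h, decide_false]
    rw [← Bool.not_eq_true, pvBLoop_zip_eq_true_iff]
    intro hch
    apply h
    apply hnodup.mpr
    have hchlt : s.IsChain (· < ·) := isChain_lt_of_ne_le hch hpw.isChain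
    exact ((List.isChain_iff_pairwise).mp hchlt).imp ne_of_lt

-- ===== VERDICT (by name: the statement is the Claim_ definition above) =====
theorem any_duplicates_spec : Claim_equal_any_duplicates := by
  intro square _
  unfold Spec_any_duplicates
  rw [any_duplicates_eq_nodup, any_duplicates_alt_eq_nodup]
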